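-- pv_equiv track=rewrite | github.com/fvutils/ivpm | src/ivpm/handlers/package_handler_agents.py | _dependency_name_candidates
-- ===== SOURCE A (Python) =====
-- from typing import Dict, List, Optional, Tuple
--
-- def _dependency_name_candidates(pkg_name: str, root_dir: str, rel_parts: List[str]) -> List[str]:
--     if not rel_parts:
--         return [pkg_name]
--
--     dir_name = rel_parts[-1]
--     parent_parts = rel_parts[:-1]
--     candidates = ["-".join([pkg_name, dir_name])]
--
--     for depth in range(1, len(parent_parts) + 1):
--         prefix = parent_parts[-depth:]
--         candidates.append("-".join([pkg_name] + prefix + [dir_name]))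
--
--     return candidates
-- ===== SOURCE B (Python) =====
-- def _dependency_name_candidates(pkg_name, root_dir, rel_parts):
--     if not rel_parts:
--         return [pkg_name]
--     suffix = rel_parts[-1]
--     candidates = ["-".join([pkg_name, suffix])]
--     for p in reversed(rel_parts[:-1]):
--         suffix = "-".join([p, suffix])
--         candidates.append("-".join([pkg_name, suffix]))
--     return candidates
-- ===== Notes on version B (the rewrite author's own statement) =====
-- stated objective: simpler
-- what changed: Instead of A's fresh slice of parent_parts and full re-join per depth, B walks the parent parts once in reverse, growing a running suffix string and emitting '-'.join([pkg_name, suffix]) at each step.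
import Mathlib
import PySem

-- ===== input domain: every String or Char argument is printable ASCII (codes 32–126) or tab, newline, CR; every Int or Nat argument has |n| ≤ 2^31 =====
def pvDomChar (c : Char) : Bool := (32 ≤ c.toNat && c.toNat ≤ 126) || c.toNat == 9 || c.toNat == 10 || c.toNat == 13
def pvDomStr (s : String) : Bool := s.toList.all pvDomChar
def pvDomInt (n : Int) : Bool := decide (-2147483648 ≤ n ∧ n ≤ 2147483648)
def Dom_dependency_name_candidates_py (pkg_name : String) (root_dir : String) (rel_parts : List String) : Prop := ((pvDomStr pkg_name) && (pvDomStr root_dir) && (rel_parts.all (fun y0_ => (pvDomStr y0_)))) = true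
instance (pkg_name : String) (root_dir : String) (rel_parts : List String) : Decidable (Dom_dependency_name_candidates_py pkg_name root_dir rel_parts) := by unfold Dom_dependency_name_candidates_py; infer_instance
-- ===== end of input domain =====

-- B builds each candidate by extending a running suffix over the reversed parent parts (one pass),
-- instead of A's fresh slice-and-join per depth; objective: simpler.

-- ===== PORT A =====
def dependency_name_candidates_py (pkg_name : String) (root_dir : String) (rel_parts : List String) : List String :=
  if rel_parts = [] then [pkg_name]
  else
    -- rel_parts[-1]: rel_parts is nonempty here, so pyGet? is some; getD "" is unreachable
    let dir_name := (PySem.List.pyGet? rel_parts (-1)).getD ""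
    let parent_parts := PySem.List.slice rel_parts none (some (-1))
    let candidates := [PySem.Str.join "-" [pkg_name, dir_name]]
    (PySem.List.pyRange 1 ((parent_parts.length : Int) + 1) 1).foldl
      (fun cands depth =>
        cands ++ [PySem.Str.join "-" ([pkg_name] ++ PySem.List.slice parent_parts (some (-depth)) none ++ [dir_name])])
      candidates

-- ===== PORT B =====
def dependency_name_candidates_py_alt (pkg_name : String) (root_dir : String) (rel_parts : List String) : List String :=
  if rel_parts = [] then [pkg_name]
  else
    let suffix0 := (PySem.List.pyGet? rel_parts (-1)).getD ""
    ((PySem.List.slice rel_parts none (some (-1))).reverse.foldl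
      (fun (st : String × List String) p =>
        (PySem.Str.join "-" [p, st.1],
         st.2 ++ [PySem.Str.join "-" [pkg_name, PySem.Str.join "-" [p, st.1]]]))
      (suffix0, [PySem.Str.join "-" [pkg_name, suffix0]])).2

-- ===== PRECONDITION & SPEC =====
def Spec_dependency_name_candidates_py (pkg_name : String) (root_dir : String) (rel_parts : List String) (out : List String) : Prop := out = dependency_name_candidates_py_alt pkg_name root_dir rel_parts
instance (pkg_name : String) (root_dir : String) (rel_parts : List String) (out : List String) : Decidable (Spec_dependency_name_candidates_py pkg_name root_dir rel_parts out) := by unfold Spec_dependency_name_candidates_py; infer_instance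

-- ===== CLAIM (what is proved, stated in full; the proofs are below) =====
def Claim_equal_dependency_name_candidates_py : Prop := ∀ (pkg_name : String) (root_dir : String) (rel_parts : List String), Dom_dependency_name_candidates_py pkg_name root_dir rel_parts → Spec_dependency_name_candidates_py pkg_name root_dir rel_parts (dependency_name_candidates_py pkg_name root_dir rel_parts)

-- ===== LEMMAS AND PROOFS =====

-- right fold "p1-p2-…-pk-d" of a part list onto a final segment
def gJoin (l : List String) (d : String) : String := l.foldr (fun p s => p ++ "-" ++ s) d

theorem join_cons_strings (x y : String) (rest : List String) :
    PySem.Str.join "-" (x :: y :: rest) = x ++ "-" ++ PySem.Str.join "-" (y :: rest) := by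
  apply String.toList_inj.mp
  simp [PySem.Str.toList_join, PySem.Chars.join_cons_cons, String.toList_append]

theorem join_single (x : String) : PySem.Str.join "-" [x] = x := by
  apply String.toList_inj.mp
  simp [PySem.Str.toList_join, PySem.Chars.join_singleton]

theorem join_pair (x y : String) : PySem.Str.join "-" [x, y] = x ++ "-" ++ y := by
  rw [join_cons_strings, join_single]

theorem gJoin_eq (l : List String) (pkg d : String) :
    PySem.Str.join "-" (pkg :: (l ++ [d])) = pkg ++ "-" ++ gJoin l d := by
  induction l generalizing pkg with
  | nil => rw [List.nil_append, join_cons_strings, join_single]; rfl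
  | cons p t ih =>
      rw [List.cons_append, join_cons_strings, ih p]; rfl

theorem rev_take (l : List String) (k : Nat) :
    (l.reverse.take k).reverse = l.drop (l.length - k) := by
  rw [List.take_reverse]; simp

theorem A_eq (pkg root : String) (rel : List String) (h : rel ≠ []) :
    dependency_name_candidates_py pkg root rel =
      (pkg ++ "-" ++ rel.getLast h) ::
        (List.range rel.dropLast.length).map
          (fun k => pkg ++ "-" ++ gJoin (rel.dropLast.drop (rel.dropLast.length - (k + 1))) (rel.getLast h)) := by
  unfold dependency_name_candidates_py
  rw [if_neg h]
  simp only [PySem.List.pyGet?_neg_one, List.getLast?_eq_getLast h, Option.getD_some,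
    PySem.List.slice_to_neg_one, PySem.List.foldl_append_singleton_eq_map, PySem.List.pyRange_one]
  rw [List.map_map]
  have hjoin0 : PySem.Str.join "-" [pkg, rel.getLast h] = pkg ++ "-" ++ rel.getLast h := by
    have := gJoin_eq [] pkg (rel.getLast h)
    simpa [gJoin] using this
  have hlen : (((rel.dropLast.length : Int) + 1) - 1).toNat = rel.dropLast.length := by
    omega
  rw [hlen, hjoin0]
  simp only [List.singleton_append, List.cons.injEq, true_and]
  apply List.map_congr_left
  intro k hk
  simp only [Function.comp_apply]
  have hneg : -((1 : Int) + (k : Int)) = -(((k + 1 : Nat) : Int)) := by push_cast; ring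
  rw [hneg, PySem.List.slice_from_neg_natCast _ _ (Nat.succ_pos k)]
  exact gJoin_eq _ pkg _

theorem B_loop (pkg d : String) (l : List String) :
    ∀ (w : List String) (acc : List String),
      (l.foldl
        (fun (st : String × List String) p =>
          (p ++ "-" ++ st.1, st.2 ++ [pkg ++ "-" ++ (p ++ "-" ++ st.1)]))
        (gJoin w d, acc)).2
      = acc ++ (List.range l.length).map
          (fun i => pkg ++ "-" ++ gJoin ((l.take (i + 1)).reverse ++ w) d) := by
  induction l with
  | nil => intro w acc; simp
  | cons p t ih =>
      intro w acc
      have hstep : p ++ "-" ++ gJoin w d = gJoin (p :: w) d := rfl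
      simp only [List.foldl_cons, hstep]
      rw [ih (p :: w) (acc ++ [pkg ++ "-" ++ gJoin (p :: w) d])]
      rw [List.length_cons, List.range_succ_eq_map, List.map_cons, List.map_map]
      simp only [List.take_succ_cons, List.reverse_cons, List.append_assoc,
        List.singleton_append, Function.comp_apply, List.take_zero, List.reverse_nil,
        List.nil_append]
      simp [gJoin]

theorem B_eq (pkg root : String) (rel : List String) (h : rel ≠ []) :
    dependency_name_candidates_py_alt pkg root rel =
      (pkg ++ "-" ++ rel.getLast h) ::
        (List.range rel.dropLast.length).map
          (fun k => pkg ++ "-" ++ gJoin (rel.dropLast.drop (rel.dropLast.length - (k + 1))) (rel.getLast h)) := by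
  unfold dependency_name_candidates_py_alt
  rw [if_neg h]
  simp only [PySem.List.pyGet?_neg_one, List.getLast?_eq_getLast h, Option.getD_some,
    PySem.List.slice_to_neg_one, join_pair]
  have hinit : rel.getLast h = gJoin [] (rel.getLast h) := rfl
  rw [hinit]
  rw [B_loop pkg (rel.getLast h) rel.dropLast.reverse []]
  simp only [List.length_reverse, List.append_nil, List.singleton_append]
  congr 1
  apply List.map_congr_left
  intro k hk
  rw [rev_take]
  rfl

-- ===== VERDICT (by name: the statement is the Claim_ definition above) =====
theorem dependency_name_candidates_py_spec : Claim_equal_dependency_name_candidates_py := by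
  intro pkg root rel _
  unfold Spec_dependency_name_candidates_py
  by_cases h : rel = []
  · subst h
    simp [dependency_name_candidates_py, dependency_name_candidates_py_alt]
  · rw [A_eq pkg root rel h, B_eq pkg root rel h]
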